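-- pv_equiv track=rewrite | github.com/rishabhmonga/practice | leet/offic_try/CitySkyline.py | findMaxCol
-- ===== SOURCE A (Python) =====
-- def findMaxCol(grid):
--     max_cols = []
--     for j in range(len(grid[0])):
--         maximum = 0
--         for i in range(len(grid)):
--             maximum = max(maximum, grid[i][j])
--         max_cols.append(maximum)
--     return max_cols
-- ===== SOURCE B (Python) =====
-- def findMaxCol(grid):
--     maxima = [0] * len(grid[0])
--     for row in grid:
--         maxima = [max(m, v) for m, v in zip(maxima, row)]
--     return maxima
-- ===== Notes on version B (the rewrite author's own statement) =====
-- stated objective: alternative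
-- what changed: Instead of A's column-outer/row-inner nested index scans, B makes a single row-major pass: it folds over the rows, maintaining a running vector of column maxima (seeded with zeros) that is merged elementwise with each row; no index arithmetic and no per-column rescans of the grid.
import Mathlib
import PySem

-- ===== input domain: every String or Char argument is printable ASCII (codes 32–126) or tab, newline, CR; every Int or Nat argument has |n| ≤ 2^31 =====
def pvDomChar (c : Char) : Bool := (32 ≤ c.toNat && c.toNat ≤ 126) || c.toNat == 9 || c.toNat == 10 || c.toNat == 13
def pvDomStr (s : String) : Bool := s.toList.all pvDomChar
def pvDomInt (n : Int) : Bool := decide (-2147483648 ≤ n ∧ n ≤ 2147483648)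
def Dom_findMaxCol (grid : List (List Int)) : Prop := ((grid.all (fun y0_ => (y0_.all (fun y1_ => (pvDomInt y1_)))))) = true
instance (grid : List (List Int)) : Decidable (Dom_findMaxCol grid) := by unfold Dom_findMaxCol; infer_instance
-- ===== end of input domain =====

-- B replaces A's column-outer/row-inner nested scans by a single row-major fold that
-- maintains a running vector of column maxima (alternative decomposition; same cost).

-- ===== PORT A =====
-- for j in range(len(grid[0])): inner loop over i in range(len(grid)), maximum seeded with 0
def findMaxCol (grid : List (List Int)) : List Int :=
  (PySem.List.pyRange 0 ((PySem.List.pyGetD grid 0 []).length : Int) 1).foldl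
    (fun max_cols j =>
      max_cols ++
        [(PySem.List.pyRange 0 (grid.length : Int) 1).foldl
          (fun maximum i => max maximum (PySem.List.pyGetD (PySem.List.pyGetD grid i []) j 0)) 0])
    []

-- ===== PORT B =====
-- maxima = [max(m, v) for m, v in zip(maxima, row)], folded over the rows,
-- seeded with [0] * len(grid[0])
def findMaxCol_alt (grid : List (List Int)) : List Int :=
  grid.foldl
    (fun maxima row => (maxima.zip row).map (fun p => max p.1 p.2))
    (List.replicate (PySem.List.pyGetD grid 0 []).length 0)

-- ===== PRECONDITION & SPEC =====
-- A indexes grid[0] and every grid[i][j] for j < len(grid[0]): it raises IndexError exactly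
-- on the empty grid and on ragged grids where some row is shorter than row 0.
def Pre_findMaxCol (grid : List (List Int)) : Prop :=
  grid ≠ [] ∧ ∀ row ∈ grid, (grid.headD []).length ≤ row.length
instance (grid : List (List Int)) : Decidable (Pre_findMaxCol grid) := by
  unfold Pre_findMaxCol; infer_instance

def pvWitness_findMaxCol : List (List Int) := [[1, -2], [3, 4]]

def Spec_findMaxCol (grid : List (List Int)) (out : List Int) : Prop := out = findMaxCol_alt grid
instance (grid : List (List Int)) (out : List Int) : Decidable (Spec_findMaxCol grid out) := by
  unfold Spec_findMaxCol; infer_instance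

-- ===== CLAIM (what is proved, stated in full; the proofs are below) =====
def Claim_equal_findMaxCol : Prop := ∀ (grid : List (List Int)), Dom_findMaxCol grid → Pre_findMaxCol grid → Spec_findMaxCol grid (findMaxCol grid)

-- ===== LEMMAS AND PROOFS =====

-- B's row-fold invariant: folding the elementwise merge over the rows, starting from any
-- accumulator of length w, yields per-column folds of max over the rows.
theorem foldl_merge_eq (rows : List (List Int)) : ∀ (acc : List Int), acc.length = w →
    (∀ r ∈ rows, w ≤ r.length) →
    rows.foldl (fun maxima row => (maxima.zip row).map (fun p => max p.1 p.2)) acc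
      = (List.range w).map (fun j => rows.foldl (fun m r => max m (r.getD j 0)) (acc.getD j 0)) := by
  induction rows with
  | nil =>
    intro acc hlen _
    apply List.ext_getElem
    · simp [hlen]
    · intro i h1 h2
      simp only [List.foldl_nil, List.getElem_map, List.getElem_range]
      rw [List.getD_eq_getElem]
  | cons r rs ih =>
    intro acc hlen hall
    simp only [List.foldl_cons]
    have hr : w ≤ r.length := hall r List.mem_cons_self
    have hmlen : ((acc.zip r).map (fun p => max p.1 p.2)).length = w := by
      simp [hlen]; omega
    rw [ih _ hmlen (fun s hs => hall s (List.mem_cons_of_mem _ hs))]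
    apply List.map_congr_left
    intro j hj
    simp only [List.mem_range] at hj
    congr 1
    rw [List.getD_eq_getElem _ _ (by omega : j < ((acc.zip r).map (fun p => max p.1 p.2)).length),
        List.getElem_map, List.getElem_zip,
        List.getD_eq_getElem _ _ (by omega : j < acc.length),
        List.getD_eq_getElem _ _ (by omega : j < r.length)]

-- ===== VERDICT (by name: the statement is the Claim_ definition above) =====
theorem findMaxCol_spec : Claim_equal_findMaxCol := by
  intro grid _ hpre
  obtain ⟨hne, hall⟩ := hpre
  unfold Spec_findMaxCol findMaxCol findMaxCol_alt
  have hhead0 : PySem.List.pyGetD grid 0 [] = grid.headD [] := by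
    cases grid with
    | nil => exact absurd rfl hne
    | cons r rs => simp [PySem.List.pyGetD]
  set w : Nat := (grid.headD []).length with hw
  -- A-side: outer foldl-append is a map, inner index loop is a fold over grid
  rw [hhead0, PySem.List.foldl_append_singleton_eq_map]
  have hinner : ∀ j : Int,
      (PySem.List.pyRange 0 (grid.length : Int) 1).foldl
        (fun maximum i => max maximum (PySem.List.pyGetD (PySem.List.pyGetD grid i []) j 0)) 0
      = grid.foldl (fun m r => max m (PySem.List.pyGetD r j 0)) 0 := by
    intro j
    exact PySem.List.foldl_pyRange_zero_pyGetD grid [] (fun m r => max m (PySem.List.pyGetD r j 0)) 0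
  simp only [hinner]
  rw [show ((w : Int) = ((w : Nat) : Int)) from rfl, PySem.List.pyRange_zero_nat, List.map_map]
  -- B-side: the row-fold invariant with the all-zero accumulator
  rw [foldl_merge_eq grid (List.replicate w 0) (by simp)
        (fun r hr => hall r hr)]
  apply List.map_congr_left
  intro j hj
  simp only [Function.comp, List.mem_range] at hj ⊢
  rw [List.getD_eq_getElem _ _ (by simpa using hj), List.getElem_replicate]
  induction grid with
  | nil => rfl
  | cons r rs ihg => simp [List.foldl_cons, PySem.List.pyGetD_natCast] at ihg ⊢
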